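-- pv_equiv track=rewrite | github.com/Danielleokula/ufcstats-scraper | ufcstats/net.py | normalize_ufcstats_url
-- ===== SOURCE A (Python) =====
-- def normalize_ufcstats_url(url: str, base: str) -> str:
--     """
--     Normalize any UFCStats URL to the selected base host.
--     """
--     u = (url or "").strip()
--     if not u:
--         return u
--
--     prefixes = (
--         "https://ufcstats.com",
--         "http://ufcstats.com",
--         "https://www.ufcstats.com",
--         "http://www.ufcstats.com",
--     )
--     for p in prefixes:
--         if u.startswith(p):
--             return base + u[len(p):]
--     return u
-- ===== SOURCE B (Python) =====
-- def normalize_ufcstats_url(url: str, base: str) -> str: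
--     """Parse scheme / optional www. / host layer by layer instead of trying four full prefixes."""
--     u = (url or "").strip()
--     if not u:
--         return u
--     rest = None
--     if u.startswith("https://"):
--         rest = u[8:]
--     elif u.startswith("http://"):
--         rest = u[7:]
--     if rest is not None:
--         if rest.startswith("www."):
--             rest = rest[4:]
--         if rest.startswith("ufcstats.com"):
--             return base + rest[12:]
--     return u
-- ===== Notes on version B (the rewrite author's own statement) =====
-- stated objective: simpler
-- what changed: Replaced the four-full-prefix scan with a layered parse: strip the scheme (https:// or http://), then an optional www., then test the single host literal ufcstats.com once.
import Mathlib
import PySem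

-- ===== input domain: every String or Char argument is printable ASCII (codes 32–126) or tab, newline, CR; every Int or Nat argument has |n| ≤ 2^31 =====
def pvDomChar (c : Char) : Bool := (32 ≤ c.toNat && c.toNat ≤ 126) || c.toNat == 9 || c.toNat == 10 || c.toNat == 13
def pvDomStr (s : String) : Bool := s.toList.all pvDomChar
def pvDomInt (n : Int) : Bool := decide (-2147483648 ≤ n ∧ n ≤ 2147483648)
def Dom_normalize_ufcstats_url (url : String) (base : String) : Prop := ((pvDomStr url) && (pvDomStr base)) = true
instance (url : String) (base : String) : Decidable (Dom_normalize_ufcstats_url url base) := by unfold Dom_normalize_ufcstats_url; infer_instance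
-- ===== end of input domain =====

-- B parses the URL layer by layer (scheme, optional "www.", host) instead of scanning four full prefixes; objective: simpler.


-- ===== PORT A =====
def pvA_loop (u : String) (base : String) : List String → String
  | [] => u
  | p :: ps =>
    if PySem.Str.startswith u p then base ++ PySem.Str.slice u (some (PySem.Str.len p : Int)) none
    else pvA_loop u base ps

def normalize_ufcstats_url (url : String) (base : String) : String :=
  let u := PySem.Str.strip url
  if u = "" then u
  else
    pvA_loop u base
      [ "https://ufcstats.com", "http://ufcstats.com",
        "https://www.ufcstats.com", "http://www.ufcstats.com" ]

-- ===== PORT B =====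
def pvB_core (u : String) (base : String) : String :=
  let rest? : Option String :=
    if PySem.Str.startswith u "https://" then some (PySem.Str.slice u (some 8) none)
    else if PySem.Str.startswith u "http://" then some (PySem.Str.slice u (some 7) none)
    else none
  match rest? with
  | some r =>
    let r2 := if PySem.Str.startswith r "www." then PySem.Str.slice r (some 4) none else r
    if PySem.Str.startswith r2 "ufcstats.com" then base ++ PySem.Str.slice r2 (some 12) none
    else u
  | none => u

def normalize_ufcstats_url_alt (url : String) (base : String) : String :=
  let u := PySem.Str.strip url
  if u = "" then u
  else pvB_core u base

-- ===== PRECONDITION & SPEC =====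
def Spec_normalize_ufcstats_url (url : String) (base : String) (out : String) : Prop := out = normalize_ufcstats_url_alt url base
instance (url : String) (base : String) (out : String) : Decidable (Spec_normalize_ufcstats_url url base out) := by unfold Spec_normalize_ufcstats_url; infer_instance

-- ===== CLAIM (what is proved, stated in full; the proofs are below) =====
def Claim_equal_normalize_ufcstats_url : Prop := ∀ (url : String) (base : String), Dom_normalize_ufcstats_url url base → Spec_normalize_ufcstats_url url base (normalize_ufcstats_url url base)

-- ===== LEMMAS AND PROOFS =====

theorem pv_sw (s p : String) : PySem.Str.startswith s p = true ↔ p.toList <+: s.toList := by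
  simp [PySem.Chars.startswith_iff]

theorem pv_sw_false (s p : String) : PySem.Str.startswith s p = false ↔ ¬ p.toList <+: s.toList := by
  rw [← pv_sw]; cases PySem.Str.startswith s p <;> simp

theorem pv_append_prefix_iff (a b l : List Char) :
    (a ++ b) <+: l ↔ a <+: l ∧ b <+: l.drop a.length := by
  constructor
  · rintro ⟨t, rfl⟩
    refine ⟨⟨b ++ t, by simp⟩, ?_⟩
    rw [List.append_assoc, List.drop_left]
    exact ⟨t, rfl⟩
  · rintro ⟨⟨t1, h1⟩, h2⟩
    subst h1
    rw [List.drop_left] at h2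
    obtain ⟨t2, h2⟩ := h2
    exact ⟨t2, by rw [List.append_assoc, h2]⟩

theorem pv_excl (a b l : List Char) (h1 : a <+: l) (h2 : b <+: l)
    (hlen : a.length ≤ b.length) (hab : ¬ a <+: b) : False :=
  hab (List.prefix_of_prefix_length_le h1 h2 hlen)

theorem pv_main (u base : String) :
    pvA_loop u base
      [ "https://ufcstats.com", "http://ufcstats.com",
        "https://www.ufcstats.com", "http://www.ufcstats.com" ] = pvB_core u base := by
  have e1 : "https://ufcstats.com".toList = "https://".toList ++ "ufcstats.com".toList := by decide
  have e2 : "http://ufcstats.com".toList = "http://".toList ++ "ufcstats.com".toList := by decide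
  have e3 : "https://www.ufcstats.com".toList =
      "https://".toList ++ ("www.".toList ++ "ufcstats.com".toList) := by decide
  have e4 : "http://www.ufcstats.com".toList =
      "http://".toList ++ ("www.".toList ++ "ufcstats.com".toList) := by decide
  have l8 : "https://".toList.length = 8 := by decide
  have l7 : "http://".toList.length = 7 := by decide
  have l4 : "www.".toList.length = 4 := by decide
  have d1 : PySem.Str.startswith u "https://ufcstats.com" = true ↔
      "https://".toList <+: u.toList ∧ "ufcstats.com".toList <+: u.toList.drop 8 := by
    rw [pv_sw, e1, pv_append_prefix_iff, l8]
  have d2 : PySem.Str.startswith u "http://ufcstats.com" = true ↔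
      "http://".toList <+: u.toList ∧ "ufcstats.com".toList <+: u.toList.drop 7 := by
    rw [pv_sw, e2, pv_append_prefix_iff, l7]
  have d3 : PySem.Str.startswith u "https://www.ufcstats.com" = true ↔
      "https://".toList <+: u.toList ∧ "www.".toList <+: u.toList.drop 8 ∧
        "ufcstats.com".toList <+: (u.toList.drop 8).drop 4 := by
    rw [pv_sw, e3, pv_append_prefix_iff, l8, pv_append_prefix_iff, l4]
  have d4 : PySem.Str.startswith u "http://www.ufcstats.com" = true ↔
      "http://".toList <+: u.toList ∧ "www.".toList <+: u.toList.drop 7 ∧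
        "ufcstats.com".toList <+: (u.toList.drop 7).drop 4 := by
    rw [pv_sw, e4, pv_append_prefix_iff, l7, pv_append_prefix_iff, l4]
  have bool_cases : ∀ b : Bool, b ≠ true → b = false := by decide
  by_cases PH : "https://".toList <+: u.toList
  · have hPT : ¬ "http://".toList <+: u.toList := fun hPT =>
      pv_excl _ _ _ hPT PH (by decide) (by decide)
    have c2 : PySem.Str.startswith u "http://ufcstats.com" = false :=
      bool_cases _ (fun h => hPT ((d2.mp h).1))
    have c4 : PySem.Str.startswith u "http://www.ufcstats.com" = false :=
      bool_cases _ (fun h => hPT ((d4.mp h).1))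
    have cB8 : PySem.Str.startswith u "https://" = true := (pv_sw _ _).mpr PH
    by_cases W : "www.".toList <+: u.toList.drop 8
    · have c1 : PySem.Str.startswith u "https://ufcstats.com" = false :=
        bool_cases _ (fun h => pv_excl _ _ _ W ((d1.mp h).2) (by decide) (by decide))
      have hw : PySem.Str.startswith (PySem.Str.slice u (some 8) none) "www." = true := by
        rw [pv_sw]
        simpa [PySem.Str.toList_slice, PySem.List.slice_from] using W
      by_cases H : "ufcstats.com".toList <+: (u.toList.drop 8).drop 4
      · have c3 : PySem.Str.startswith u "https://www.ufcstats.com" = true :=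
          d3.mpr ⟨PH, W, H⟩
        have hh : PySem.Str.startswith
            (PySem.Str.slice (PySem.Str.slice u (some 8) none) (some 4) none) "ufcstats.com" = true := by
          rw [pv_sw]
          simpa [PySem.Str.toList_slice, PySem.List.slice_from, List.drop_drop] using H
        simp only [pvA_loop, pvB_core, c1, c2, c3, cB8, hw, hh, Bool.false_eq_true,
          ite_false, ite_true]
        refine congrArg (base ++ ·) (String.toList_inj.mp ?_)
        simp [PySem.Str.toList_slice, PySem.List.slice_from, List.drop_drop, PySem.Str.len]
      · have c3 : PySem.Str.startswith u "https://www.ufcstats.com" = false :=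
          bool_cases _ (fun h => H (d3.mp h).2.2)
        have hh : PySem.Str.startswith
            (PySem.Str.slice (PySem.Str.slice u (some 8) none) (some 4) none) "ufcstats.com" = false := by
          rw [pv_sw_false]
          simpa [PySem.Str.toList_slice, PySem.List.slice_from, List.drop_drop] using H
        simp only [pvA_loop, pvB_core, c1, c2, c3, c4, cB8, hw, hh, Bool.false_eq_true,
          ite_false, ite_true]
    · have c3 : PySem.Str.startswith u "https://www.ufcstats.com" = false :=
        bool_cases _ (fun h => W (d3.mp h).2.1)
      have hw : PySem.Str.startswith (PySem.Str.slice u (some 8) none) "www." = false := by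
        rw [pv_sw_false]
        simpa [PySem.Str.toList_slice, PySem.List.slice_from] using W
      by_cases H1 : "ufcstats.com".toList <+: u.toList.drop 8
      · have c1 : PySem.Str.startswith u "https://ufcstats.com" = true := d1.mpr ⟨PH, H1⟩
        have hh : PySem.Str.startswith (PySem.Str.slice u (some 8) none) "ufcstats.com" = true := by
          rw [pv_sw]
          simpa [PySem.Str.toList_slice, PySem.List.slice_from] using H1
        simp only [pvA_loop, pvB_core, c1, cB8, hw, hh, Bool.false_eq_true,
          ite_false, ite_true]
        refine congrArg (base ++ ·) (String.toList_inj.mp ?_)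
        simp [PySem.Str.toList_slice, PySem.List.slice_from, List.drop_drop, PySem.Str.len]
      · have c1 : PySem.Str.startswith u "https://ufcstats.com" = false :=
          bool_cases _ (fun h => H1 (d1.mp h).2)
        have hh : PySem.Str.startswith (PySem.Str.slice u (some 8) none) "ufcstats.com" = false := by
          rw [pv_sw_false]
          simpa [PySem.Str.toList_slice, PySem.List.slice_from] using H1
        simp only [pvA_loop, pvB_core, c1, c2, c3, c4, cB8, hw, hh, Bool.false_eq_true,
          ite_false, ite_true]
  · have cB8 : PySem.Str.startswith u "https://" = false := (pv_sw_false _ _).mpr PH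
    have c1 : PySem.Str.startswith u "https://ufcstats.com" = false :=
      bool_cases _ (fun h => PH ((d1.mp h).1))
    have c3 : PySem.Str.startswith u "https://www.ufcstats.com" = false :=
      bool_cases _ (fun h => PH ((d3.mp h).1))
    by_cases PT : "http://".toList <+: u.toList
    · have cB7 : PySem.Str.startswith u "http://" = true := (pv_sw _ _).mpr PT
      by_cases W : "www.".toList <+: u.toList.drop 7
      · have c2 : PySem.Str.startswith u "http://ufcstats.com" = false :=
          bool_cases _ (fun h => pv_excl _ _ _ W ((d2.mp h).2) (by decide) (by decide))
        have hw : PySem.Str.startswith (PySem.Str.slice u (some 7) none) "www." = true := by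
          rw [pv_sw]
          simpa [PySem.Str.toList_slice, PySem.List.slice_from] using W
        by_cases H : "ufcstats.com".toList <+: (u.toList.drop 7).drop 4
        · have c4 : PySem.Str.startswith u "http://www.ufcstats.com" = true :=
            d4.mpr ⟨PT, W, H⟩
          have hh : PySem.Str.startswith
              (PySem.Str.slice (PySem.Str.slice u (some 7) none) (some 4) none) "ufcstats.com" = true := by
            rw [pv_sw]
            simpa [PySem.Str.toList_slice, PySem.List.slice_from, List.drop_drop] using H
          simp only [pvA_loop, pvB_core, c1, c2, c3, c4, cB8, cB7, hw, hh,
            Bool.false_eq_true, ite_false, ite_true]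
          refine congrArg (base ++ ·) (String.toList_inj.mp ?_)
          simp [PySem.Str.toList_slice, PySem.List.slice_from, List.drop_drop, PySem.Str.len]
        · have c4 : PySem.Str.startswith u "http://www.ufcstats.com" = false :=
            bool_cases _ (fun h => H (d4.mp h).2.2)
          have hh : PySem.Str.startswith
              (PySem.Str.slice (PySem.Str.slice u (some 7) none) (some 4) none) "ufcstats.com" = false := by
            rw [pv_sw_false]
            simpa [PySem.Str.toList_slice, PySem.List.slice_from, List.drop_drop] using H
          simp only [pvA_loop, pvB_core, c1, c2, c3, c4, cB8, cB7, hw, hh,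
            Bool.false_eq_true, ite_false, ite_true]
      · have c4 : PySem.Str.startswith u "http://www.ufcstats.com" = false :=
          bool_cases _ (fun h => W (d4.mp h).2.1)
        have hw : PySem.Str.startswith (PySem.Str.slice u (some 7) none) "www." = false := by
          rw [pv_sw_false]
          simpa [PySem.Str.toList_slice, PySem.List.slice_from] using W
        by_cases H1 : "ufcstats.com".toList <+: u.toList.drop 7
        · have c2 : PySem.Str.startswith u "http://ufcstats.com" = true := d2.mpr ⟨PT, H1⟩
          have hh : PySem.Str.startswith (PySem.Str.slice u (some 7) none) "ufcstats.com" = true := by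
            rw [pv_sw]
            simpa [PySem.Str.toList_slice, PySem.List.slice_from] using H1
          simp only [pvA_loop, pvB_core, c1, c2, cB8, cB7, hw, hh, Bool.false_eq_true,
            ite_false, ite_true]
          refine congrArg (base ++ ·) (String.toList_inj.mp ?_)
          simp [PySem.Str.toList_slice, PySem.List.slice_from, List.drop_drop, PySem.Str.len]
        · have c2 : PySem.Str.startswith u "http://ufcstats.com" = false :=
            bool_cases _ (fun h => H1 (d2.mp h).2)
          have hh : PySem.Str.startswith (PySem.Str.slice u (some 7) none) "ufcstats.com" = false := by
            rw [pv_sw_false]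
            simpa [PySem.Str.toList_slice, PySem.List.slice_from] using H1
          simp only [pvA_loop, pvB_core, c1, c2, c3, c4, cB8, cB7, hw, hh,
            Bool.false_eq_true, ite_false, ite_true]
    · have cB7 : PySem.Str.startswith u "http://" = false := (pv_sw_false _ _).mpr PT
      have c2 : PySem.Str.startswith u "http://ufcstats.com" = false :=
        bool_cases _ (fun h => PT ((d2.mp h).1))
      have c4 : PySem.Str.startswith u "http://www.ufcstats.com" = false :=
        bool_cases _ (fun h => PT ((d4.mp h).1))
      simp only [pvA_loop, pvB_core, c1, c2, c3, c4, cB8, cB7, Bool.false_eq_true,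
        ite_false, ite_true]

-- ===== VERDICT (by name: the statement is the Claim_ definition above) =====
theorem normalize_ufcstats_url_spec : Claim_equal_normalize_ufcstats_url := by
  intro url base _
  unfold Spec_normalize_ufcstats_url normalize_ufcstats_url normalize_ufcstats_url_alt
  by_cases h : PySem.Str.strip url = ""
  · simp only [h, if_true]
  · simp only [h, if_false]
    exact pv_main (PySem.Str.strip url) base
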